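-- pv_equiv track=rewrite | github.com/mhewDai/112 | hw/hw2/hw2.py | hasConsecutiveDigits
-- ===== SOURCE A (Python) =====
-- def hasConsecutiveDigits(n):
--     n = abs(n)
--     previousDigit = -1
--     while (n>0):
--         lastDigit = n%10
--         n //= 10
--         if (previousDigit == lastDigit):
--             return True
--         previousDigit = lastDigit
--     return False
-- ===== SOURCE B (Python) =====
-- def hasConsecutiveDigits(n):
--     s = str(abs(n))
--     return any(a == b for a, b in zip(s, s[1:]))
-- ===== Notes on version B (the rewrite author's own statement) =====
-- stated objective: idiomatic
-- what changed: Instead of peeling digits arithmetically with mod/floordiv while tracking a previousDigit accumulator, B renders the number as its decimal string and scans adjacent character pairs with zip/any.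
import Mathlib
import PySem

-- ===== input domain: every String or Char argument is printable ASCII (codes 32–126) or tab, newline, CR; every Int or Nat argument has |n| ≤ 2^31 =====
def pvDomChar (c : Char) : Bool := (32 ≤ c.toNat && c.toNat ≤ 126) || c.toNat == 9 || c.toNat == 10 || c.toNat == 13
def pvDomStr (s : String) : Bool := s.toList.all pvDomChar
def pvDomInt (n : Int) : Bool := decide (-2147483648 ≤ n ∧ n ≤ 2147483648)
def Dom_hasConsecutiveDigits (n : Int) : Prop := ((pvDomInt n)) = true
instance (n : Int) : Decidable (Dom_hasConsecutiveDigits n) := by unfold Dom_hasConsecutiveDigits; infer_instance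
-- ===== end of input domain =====

-- B replaces A's mod/floordiv digit peeling (tracking previousDigit) by rendering the
-- number as its decimal string and scanning adjacent character pairs (idiomatic, same cost).

-- ===== PORT A =====
-- the while loop of A, with state (n, previousDigit)
def hasConsecutiveDigitsLoop (n previousDigit : Int) : Bool :=
  if _h : 0 < n then
    let lastDigit := PySem.Int.mod n 10
    let n' := PySem.Int.floordiv n 10
    if previousDigit = lastDigit then true
    else hasConsecutiveDigitsLoop n' lastDigit
  else false
termination_by n.toNat
decreasing_by
  rw [PySem.Int.floordiv_eq_ediv_of_pos (by norm_num : (0:Int) < 10)]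
  omega

def hasConsecutiveDigits (n : Int) : Bool :=
  hasConsecutiveDigitsLoop |n| (-1)

-- ===== PORT B =====
def hasConsecutiveDigits_alt (n : Int) : Bool :=
  let s := (PySem.Int.toStr |n|).toList
  (s.zip (PySem.List.slice s (some 1) none)).any (fun p => p.1 == p.2)

-- ===== PRECONDITION & SPEC =====
def Spec_hasConsecutiveDigits (n : Int) (out : Bool) : Prop := out = hasConsecutiveDigits_alt n
instance (n : Int) (out : Bool) : Decidable (Spec_hasConsecutiveDigits n out) := by unfold Spec_hasConsecutiveDigits; infer_instance

-- ===== CLAIM (what is proved, stated in full; the proofs are below) =====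
def Claim_equal_hasConsecutiveDigits : Prop := ∀ (n : Int), Dom_hasConsecutiveDigits n → Spec_hasConsecutiveDigits n (hasConsecutiveDigits n)

-- ===== LEMMAS AND PROOFS =====

-- adjacent-equal-pair test on a list of characters (structural form of B's zip/any)
def adjC : List Char → Bool
  | a :: b :: t => (a == b) || adjC (b :: t)
  | _ => false

-- adjacent-equal-pair test on the list of digits
def adjN : List Nat → Bool
  | a :: b :: t => (a == b) || adjN (b :: t)
  | _ => false

-- A's loop, re-expressed over the base-10 digit list (least significant first)
def lsfCheck : List Nat → Int → Bool
  | [], _ => false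
  | d :: ds, prev => if prev = (d : Int) then true else lsfCheck ds (d : Int)

-- MSF decimal digit characters by well-founded recursion (the shape of Nat.toDigits 10)
def digitsChars (m : Nat) : List Char :=
  if _h : m < 10 then [Nat.digitChar m]
  else digitsChars (m / 10) ++ [Nat.digitChar (m % 10)]
termination_by m
decreasing_by exact Nat.div_lt_self (by omega) (by norm_num)

theorem toDigitsCore_append (b f : Nat) :
    ∀ (n : Nat) (acc : List Char),
      Nat.toDigitsCore b f n acc = Nat.toDigitsCore b f n [] ++ acc := by
  induction f with
  | zero => intro n acc; simp [Nat.toDigitsCore]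
  | succ f ih =>
    intro n acc
    simp only [Nat.toDigitsCore]
    by_cases h : n / b = 0
    · simp [h]
    · simp only [h, if_false]
      rw [ih (n / b) (Nat.digitChar (n % b) :: acc), ih (n / b) [Nat.digitChar (n % b)]]
      simp

theorem toDigitsCore_eq_digitsChars :
    ∀ (f m : Nat), m < f → Nat.toDigitsCore 10 f m [] = digitsChars m := by
  intro f
  induction f with
  | zero => intro m hm; omega
  | succ f ih =>
    intro m hm
    rw [digitsChars]
    simp only [Nat.toDigitsCore]
    by_cases h : m < 10
    · have h0 : m / 10 = 0 := Nat.div_eq_of_lt h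
      simp [h, h0, Nat.mod_eq_of_lt h]
    · have h0 : m / 10 ≠ 0 := by
        intro hc
        exact h (by omega : m < 10)
      have hlt : m / 10 < f :=
        lt_of_lt_of_le (Nat.div_lt_self (by omega) (by norm_num)) (by omega)
      rw [if_neg h0, dif_neg h, toDigitsCore_append, ih (m / 10) hlt]

theorem toDigits_eq_digitsChars (m : Nat) : Nat.toDigits 10 m = digitsChars m := by
  have := toDigitsCore_eq_digitsChars (m + 1) m (by omega)
  simpa [Nat.toDigits] using this

theorem zip_any_eq_adjC (l : List Char) :
    (l.zip l.tail).any (fun p => p.1 == p.2) = adjC l := by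
  induction l with
  | nil => rfl
  | cons a t ih =>
    cases t with
    | nil => rfl
    | cons b t' => simp [adjC, ← ih]

theorem adjC_append_last (l : List Char) (x : Char) :
    adjC (l ++ [x]) = (adjC l || (match l.getLast? with
      | some y => y == x
      | none => false)) := by
  induction l with
  | nil => rfl
  | cons a t ih =>
    cases t with
    | nil => simp [adjC]
    | cons b t' =>
      simp only [List.cons_append, adjC] at *
      rw [ih]
      simp [Bool.or_assoc, List.getLast?_cons_cons]

theorem adjC_reverse (l : List Char) : adjC l.reverse = adjC l := by
  induction l with
  | nil => rfl
  | cons a t ih =>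
    rw [List.reverse_cons, adjC_append_last, ih]
    cases t with
    | nil => rfl
    | cons b t' =>
      simp [adjC, List.getLast?_reverse, Bool.or_comm, BEq.comm]

theorem digitChar_beq (a b : Nat) (ha : a < 10) (hb : b < 10) :
    (Nat.digitChar a == Nat.digitChar b) = (a == b) := by
  interval_cases a <;> interval_cases b <;> decide

theorem adjC_map_digitChar (l : List Nat) (h : ∀ d ∈ l, d < 10) :
    adjC (l.map Nat.digitChar) = adjN l := by
  induction l with
  | nil => rfl
  | cons a t ih =>
    cases t with
    | nil => rfl
    | cons b t' =>
      have ht := ih (fun d hd => h d (by simp [hd]))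
      simp only [List.map_cons] at ht
      simp only [List.map_cons, adjC, adjN, ht,
        digitChar_beq a b (h a (by simp)) (h b (by simp))]

theorem digitsChars_eq (m : Nat) (hm : 0 < m) :
    digitsChars m = ((Nat.digits 10 m).map Nat.digitChar).reverse := by
  induction m using Nat.strong_induction_on with
  | _ m ih =>
    rw [digitsChars, Nat.digits_def' (by norm_num : 1 < 10) hm]
    by_cases h : m < 10
    · have h0 : m / 10 = 0 := Nat.div_eq_of_lt h
      simp [h, h0, Nat.mod_eq_of_lt h]
    · have h1 : 0 < m / 10 := Nat.div_pos (by omega) (by norm_num)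
      have h2 : m / 10 < m := Nat.div_lt_self (by omega) (by norm_num)
      rw [dif_neg h, ih (m / 10) h2 h1]
      simp

theorem lsfCheck_eq (ds : List Nat) :
    ∀ prev : Int, lsfCheck ds prev =
      ((match ds with
        | [] => false
        | d :: _ => decide (prev = (d : Int))) || adjN ds) := by
  induction ds with
  | nil => intro prev; rfl
  | cons d t ih =>
    intro prev
    simp only [lsfCheck]
    rw [ih (d : Int)]
    have hc : ∀ a b : Nat, (decide ((a : Int) = (b : Int))) = (a == b) := by
      intro a b; cases hab : a == b <;> simp_all
    cases t with
    | nil =>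
      simp only [adjN, Bool.or_false]
      split_ifs with hp <;> simp [hp]
    | cons d' t' =>
      simp only [adjN, hc]
      split_ifs with hp <;> simp [hp]

theorem aLoop_eq_lsfCheck :
    ∀ (m : Nat) (prev : Int),
      hasConsecutiveDigitsLoop (m : Int) prev = lsfCheck (Nat.digits 10 m) prev := by
  intro m
  induction m using Nat.strong_induction_on with
  | _ m ih =>
    intro prev
    by_cases hm : 0 < m
    · rw [hasConsecutiveDigitsLoop, Nat.digits_def' (by norm_num : 1 < 10) hm]
      have hpos : (0 : Int) < (m : Int) := by exact_mod_cast hm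
      have hmod : PySem.Int.mod (m : Int) 10 = ((m % 10 : Nat) : Int) := by
        rw [PySem.Int.mod_eq_emod_of_pos (by norm_num)]
        omega
      have hdiv : PySem.Int.floordiv (m : Int) 10 = ((m / 10 : Nat) : Int) := by
        rw [PySem.Int.floordiv_eq_ediv_of_pos (by norm_num)]
        omega
      simp only [dif_pos hpos, hmod, hdiv, lsfCheck]
      split_ifs with hp
      · rfl
      · exact ih (m / 10) (Nat.div_lt_self hm (by norm_num)) _
    · have hm0 : m = 0 := by omega
      subst hm0
      rw [hasConsecutiveDigitsLoop]
      simp [lsfCheck, Nat.digits_zero]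

theorem aSide (m : Nat) :
    hasConsecutiveDigitsLoop (m : Int) (-1) = adjN (Nat.digits 10 m) := by
  rw [aLoop_eq_lsfCheck, lsfCheck_eq]
  cases h : Nat.digits 10 m with
  | nil => rfl
  | cons d t =>
    have : ¬ ((-1 : Int) = (d : Int)) := by omega
    simp [this]

-- ===== VERDICT (by name: the statement is the Claim_ definition above) =====
theorem hasConsecutiveDigits_spec : Claim_equal_hasConsecutiveDigits := by
  intro n _
  unfold Spec_hasConsecutiveDigits hasConsecutiveDigits hasConsecutiveDigits_alt
  have habs : |n| = ((n.natAbs : Nat) : Int) := Int.abs_eq_natAbs n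
  have htc : (PySem.Int.toStr ((n.natAbs : Nat) : Int)).toList = digitsChars n.natAbs := by
    rw [PySem.Int.toList_toStr]
    simp only [PySem.Int.toChars]
    rw [if_neg (by omega), Int.toNat_natCast]
    exact toDigits_eq_digitsChars _
  simp only [habs, htc, PySem.List.slice_from_one, zip_any_eq_adjC, aSide]
  by_cases hm0 : 0 < n.natAbs
  · rw [digitsChars_eq n.natAbs hm0, adjC_reverse, adjC_map_digitChar]
    intro d hd
    exact Nat.digits_lt_base (by norm_num) hd
  · have h0 : n.natAbs = 0 := by omega
    rw [h0]
    simp [digitsChars, adjC, adjN]
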